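-- pv_equiv track=rewrite | github.com/pypi-data/pypi-mirror-384 | packages/assertlang/assertlang-0.0.1-py3-none-any.whl/reverse_parsers/rust_parser.py | _extract_doc_comments
-- ===== SOURCE A (Python) =====
-- def _extract_doc_comments(preceding_text: str) -> str:
--     """Extract Rust doc comments (///) from preceding text."""
--     lines = preceding_text.split('\n')
--     doc_lines = []
--
--     # Collect lines starting with /// (in reverse, then reverse back)
--     for line in reversed(lines):
--         stripped = line.strip()
--         if stripped.startswith('///'):
--             # Remove /// and leading/trailing whitespace
--             doc_lines.append(stripped[3:].strip())
--         elif stripped and not stripped.startswith('//'):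
--             # Stop at first non-comment line
--             break
--
--     # Reverse to get original order
--     return '\n'.join(reversed(doc_lines))
-- ===== SOURCE B (Python) =====
-- def _extract_doc_comments(preceding_text: str) -> str:
--     """Extract Rust doc comments (///) from preceding text."""
--     lines = preceding_text.split('\n')
--     # index just past the last "breaking" line (non-empty, not a // comment)
--     start = 0
--     for i, line in enumerate(lines):
--         s = line.strip()
--         if s and not s.startswith('//'):
--             start = i + 1
--     # the trailing block: keep the /// lines, strip the marker
--     return '\n'.join(l.strip()[3:].strip()
--                      for l in lines[start:] if l.strip().startswith('///'))
-- ===== Notes on version B (the rewrite author's own statement) =====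
-- stated objective: alternative
-- what changed: B replaces A's reversed scan with early break plus two reversals by staged passes: one forward index scan locating the position after the last breaking line, then a slice/filter/map comprehension over the trailing block.
import Mathlib
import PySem

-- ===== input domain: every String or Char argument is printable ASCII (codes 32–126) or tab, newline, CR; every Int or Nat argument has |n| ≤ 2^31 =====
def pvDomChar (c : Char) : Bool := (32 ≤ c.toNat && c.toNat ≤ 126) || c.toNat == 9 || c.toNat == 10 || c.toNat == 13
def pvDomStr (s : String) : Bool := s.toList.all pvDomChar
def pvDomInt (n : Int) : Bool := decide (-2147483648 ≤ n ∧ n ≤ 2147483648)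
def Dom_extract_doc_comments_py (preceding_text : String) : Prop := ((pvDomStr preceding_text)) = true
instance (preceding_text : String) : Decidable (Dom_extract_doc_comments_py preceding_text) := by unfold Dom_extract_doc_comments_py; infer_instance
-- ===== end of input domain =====

-- B replaces A's reversed scan-with-break plus two reversals by staged passes: a forward
-- index scan finding the position after the last breaking line, then slice/filter/map.

-- ===== PORT A =====
-- the for-loop over reversed(lines) with its break, producing doc_lines in append order
def pvGoA : List String → List String
  | [] => []
  | l :: rest =>
    let stripped := PySem.Str.strip l
    if PySem.Str.startswith stripped "///" then
      PySem.Str.strip (PySem.Str.slice stripped (some 3) none) :: pvGoA rest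
    else if stripped ≠ "" ∧ ¬ PySem.Str.startswith stripped "//" then
      []
    else
      pvGoA rest

def extract_doc_comments_py (preceding_text : String) : String :=
  let lines := (PySem.Str.split? preceding_text "\n").getD []
  let doc_lines := pvGoA lines.reverse
  PySem.Str.join "\n" doc_lines.reverse

-- ===== PORT B =====
def extract_doc_comments_py_alt (preceding_text : String) : String :=
  let lines := (PySem.Str.split? preceding_text "\n").getD []
  -- index just past the last breaking line (non-empty, not a // comment)
  let start : Int := (PySem.List.enumerate lines).foldl
    (fun st p =>
      if PySem.Str.strip p.2 ≠ "" ∧ ¬ PySem.Str.startswith (PySem.Str.strip p.2) "//" then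
        p.1 + 1
      else st) 0
  PySem.Str.join "\n"
    (((PySem.List.slice lines (some start) none).filter
        (fun l => PySem.Str.startswith (PySem.Str.strip l) "///")).map
      (fun l => PySem.Str.strip (PySem.Str.slice (PySem.Str.strip l) (some 3) none)))

-- ===== PRECONDITION & SPEC =====
def Spec_extract_doc_comments_py (preceding_text : String) (out : String) : Prop :=
  out = extract_doc_comments_py_alt preceding_text
instance (preceding_text : String) (out : String) :
    Decidable (Spec_extract_doc_comments_py preceding_text out) := by
  unfold Spec_extract_doc_comments_py; infer_instance

-- ===== CLAIM =====
def Claim_equal_extract_doc_comments_py : Prop :=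
  ∀ (preceding_text : String), Dom_extract_doc_comments_py preceding_text →
    Spec_extract_doc_comments_py preceding_text (extract_doc_comments_py preceding_text)

-- ===== LEMMAS AND PROOFS =====

-- a line on which A's loop breaks (and past whose last occurrence B slices)
def pvBreaking (l : String) : Bool :=
  !decide (PySem.Str.strip l = "") &&
    !PySem.Chars.startswith (PySem.Chars.strip l.toList) ['/', '/']

def pvIsDoc (l : String) : Bool := PySem.Str.startswith (PySem.Str.strip l) "///"

def pvDocText (l : String) : String :=
  PySem.Str.strip (PySem.Str.slice (PySem.Str.strip l) (some 3) none)

-- a '///' line starts with '//'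
lemma pv_three_two (s : List Char) (h : PySem.Chars.startswith s ['/', '/', '/'] = true) :
    PySem.Chars.startswith s ['/', '/'] = true := by
  rw [PySem.Chars.startswith_iff] at *
  exact List.IsPrefix.trans ⟨['/'], rfl⟩ h

-- A's loop collects the doc lines of the maximal breaking-free prefix of its input
lemma pvGoA_eq (xs : List String) :
    pvGoA xs = ((xs.takeWhile (fun l => !pvBreaking l)).filter pvIsDoc).map pvDocText := by
  induction xs with
  | nil => simp [pvGoA]
  | cons l rest ih =>
    by_cases h3 : PySem.Chars.startswith (PySem.Chars.strip l.toList) ['/', '/', '/'] = true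
    · have h2 := pv_three_two _ h3
      simp [pvGoA, pvBreaking, pvIsDoc, pvDocText, h3, h2, ih]
    · by_cases hE : PySem.Str.strip l = ""
      · have hS : PySem.Chars.strip l.toList = [] := by
          have := congrArg String.toList hE; simpa using this
        have hsw : PySem.Chars.startswith ([] : List Char) ['/', '/', '/'] = false := by decide
        simp [pvGoA, pvBreaking, pvIsDoc, hE, hS, hsw, ih]
      · by_cases h2 : PySem.Chars.startswith (PySem.Chars.strip l.toList) ['/', '/'] = true
        · simp [pvGoA, pvBreaking, pvIsDoc, hE, h2, h3, ih]
        · simp [pvGoA, pvBreaking, hE, h2, h3]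

-- B's forward index scan, named for the proofs
def pvStart (lines : List String) : Int :=
  (PySem.List.enumerate lines).foldl
    (fun st p =>
      if PySem.Str.strip p.2 ≠ "" ∧ ¬ PySem.Str.startswith (PySem.Str.strip p.2) "//" then
        p.1 + 1
      else st) 0

lemma pvStart_append (xs : List String) (a : String) :
    pvStart (xs ++ [a]) = if pvBreaking a then (xs.length : Int) + 1 else pvStart xs := by
  unfold pvStart
  rw [PySem.List.enumerate_append, List.foldl_append, PySem.List.enumerate_cons,
    PySem.List.enumerate_nil]
  by_cases hE : PySem.Str.strip a = ""
  · have hS : PySem.Chars.strip a.toList = [] := by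
      have := congrArg String.toList hE; simpa using this
    simp [pvBreaking, hE, hS]
  · by_cases h2 : PySem.Chars.startswith (PySem.Chars.strip a.toList) ['/', '/'] = true
    · simp [pvBreaking, hE, h2]
    · simp [pvBreaking, hE, h2]

-- the slice start is a natural index and the sliced tail is the maximal breaking-free suffix
lemma pvStart_slice (lines : List String) :
    ∃ n : Nat, pvStart lines = (n : Int) ∧ n ≤ lines.length ∧
      lines.drop n = (lines.reverse.takeWhile (fun l => !pvBreaking l)).reverse := by
  induction lines using List.reverseRecOn with
  | nil => exact ⟨0, by simp [pvStart, PySem.List.enumerate_nil], by simp, by simp⟩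
  | append_singleton xs a ih =>
    obtain ⟨n, hn, hle, hdrop⟩ := ih
    rw [pvStart_append]
    by_cases hb : pvBreaking a = true
    · refine ⟨xs.length + 1, by rw [if_pos hb]; push_cast; ring, by simp, ?_⟩
      simp [hb, List.drop_eq_nil_of_le]
    · have hb' : pvBreaking a = false := by simpa using hb
      refine ⟨n, by simp [hb', hn], by simp; omega, ?_⟩
      rw [List.reverse_append, List.reverse_singleton, List.singleton_append,
        List.takeWhile_cons, hb']
      simp only [Bool.not_false, if_true, List.reverse_cons]
      rw [← hdrop, List.drop_append_of_le_length hle]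

-- ===== VERDICT =====
theorem extract_doc_comments_py_spec : Claim_equal_extract_doc_comments_py := by
  intro t _
  unfold Spec_extract_doc_comments_py extract_doc_comments_py extract_doc_comments_py_alt
  obtain ⟨n, hn, _, hdrop⟩ := pvStart_slice ((PySem.Str.split? t "\n").getD [])
  show PySem.Str.join "\n" (pvGoA _).reverse =
    PySem.Str.join "\n"
      (((PySem.List.slice ((PySem.Str.split? t "\n").getD [])
          (some (pvStart ((PySem.Str.split? t "\n").getD []))) none).filter pvIsDoc).map
        pvDocText)
  rw [pvGoA_eq, hn, PySem.List.slice_from_natCast, hdrop, List.filter_reverse,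
    List.map_reverse]
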